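-- pv_equiv track=rewrite | github.com/runshiwa/epson | epson/utility.py | remove_indent
-- ===== SOURCE A (Python) =====
-- import itertools
--
-- def remove_indent(multiline_string):
--     valid_line = [
--         line
--         for line in multiline_string.splitlines()
--         if line.strip()
--     ]
--     common_prefix = "".join(
--         s[0]
--         for s in itertools.takewhile(lambda x: all(x[0].isspace() and x[0] == c for c in x), zip(*valid_line))
--     )
--     multiline_string = "\n".join(
--         line.removeprefix(common_prefix)
--         for line in multiline_string.splitlines()
--     )
--     return multiline_string
-- ===== SOURCE B (Python) =====
-- def remove_indent(multiline_string):
--     lines = multiline_string.splitlines()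
--     prefix = None
--     for line in lines:
--         if line.strip():
--             ws = line[:len(line) - len(line.lstrip())]
--             if prefix is None:
--                 prefix = ws
--             else:
--                 i = 0
--                 n = min(len(prefix), len(ws))
--                 while i < n and prefix[i] == ws[i]:
--                     i += 1
--                 prefix = prefix[:i]
--     if prefix is None:
--         prefix = ""
--     out = []
--     for line in lines:
--         out.append(line[len(prefix):] if line.startswith(prefix) else line)
--     return "\n".join(out)
-- ===== Notes on version B (the rewrite author's own statement) =====
-- stated objective: alternative
-- what changed: Replaces A's column-major zip(*valid_lines) + itertools.takewhile scan over character columns by a row-major single fold that extracts each non-blank line's leading-whitespace run and truncates a running longest-common-prefix, with no transposition and no per-column all() scan.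
import Mathlib
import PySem

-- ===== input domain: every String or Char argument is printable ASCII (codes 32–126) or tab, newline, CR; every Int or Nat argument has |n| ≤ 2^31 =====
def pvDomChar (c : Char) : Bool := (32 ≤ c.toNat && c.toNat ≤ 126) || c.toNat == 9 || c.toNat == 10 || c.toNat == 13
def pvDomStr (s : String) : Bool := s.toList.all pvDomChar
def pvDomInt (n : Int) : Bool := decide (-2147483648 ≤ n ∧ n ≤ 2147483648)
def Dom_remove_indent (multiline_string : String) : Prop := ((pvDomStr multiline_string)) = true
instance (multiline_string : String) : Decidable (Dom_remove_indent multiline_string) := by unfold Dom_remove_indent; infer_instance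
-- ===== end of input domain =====

-- B replaces A's column-major zip(*lines)+takewhile indent search by a row-major fold that
-- truncates a running longest-common-prefix of the leading-whitespace runs (objective: alternative).

-- ===== PORT A =====

-- termination measure lemma for pyZipCols (cited by its decreasing_by)
theorem pv_sum_tail_lt (ls : List (List Char)) (h1 : ls ≠ [])
    (h2 : ¬ ls.any (·.isEmpty) = true) :
    ((ls.map (·.tail)).map List.length).sum < (ls.map List.length).sum := by
  induction ls with
  | nil => exact absurd rfl h1
  | cons a t ih =>
    simp only [List.any_cons, Bool.or_eq_true, not_or] at h2
    obtain ⟨ha, ht⟩ := h2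
    have ha' : a ≠ [] := by simpa [List.isEmpty_iff] using ha
    have hlen : a.tail.length < a.length := by
      cases a with
      | nil => exact absurd rfl ha'
      | cons x xs => simp
    by_cases hte : t = []
    · subst hte; simpa using hlen
    · have := ih hte ht
      simp only [List.map_cons, List.sum_cons]
      omega

-- zip(*valid_line): the list of columns, stopping at the shortest line (hand port of zip(); exact)
def pyZipCols (ls : List (List Char)) : List (List Char) :=
  if ls = [] ∨ ls.any (·.isEmpty) then []
  else (ls.map (·.headI)) :: pyZipCols (ls.map (·.tail))
termination_by (ls.map List.length).sum
decreasing_by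
  rename_i h
  push Not at h
  simpa using pv_sum_tail_lt ls h.1 h.2

-- lambda x: all(x[0].isspace() and x[0] == c for c in x)  (columns are nonempty whenever built)
def colPredA (s : List Char) : Bool :=
  s.all (fun c => PySem.Chars.isspace s.headI && (s.headI == c))

def remove_indent (multiline_string : String) : String :=
  let lines := PySem.Chars.splitlines multiline_string.toList
  let valid_line := lines.filter (fun line => !(PySem.Chars.strip line).isEmpty)
  let common_prefix := ((pyZipCols valid_line).takeWhile colPredA).map (·.headI)
  -- line.removeprefix(common_prefix): drop it if it is a prefix, else unchanged (hand port; exact)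
  String.mk (PySem.Chars.join ['\n'] (lines.map (fun line =>
    if PySem.Chars.startswith line common_prefix then line.drop common_prefix.length else line)))

-- ===== PORT B =====

-- Source B's while-loop computing the longest common prefix of two strings, as the structural recursion
def lcpB : List Char → List Char → List Char
  | x :: xs, y :: ys => if x == y then x :: lcpB xs ys else []
  | _, _ => []

-- body of Source B's first loop: skip blank lines, fold the leading-whitespace run into the running prefix
def stepB (pref : Option (List Char)) (line : List Char) : Option (List Char) :=
  if !(PySem.Chars.strip line).isEmpty then
    some (match pref with
          | none => line.take (line.length - (PySem.Chars.lstrip line).length)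
          | some p => lcpB p (line.take (line.length - (PySem.Chars.lstrip line).length)))
  else pref

def remove_indent_alt (multiline_string : String) : String :=
  let lines := PySem.Chars.splitlines multiline_string.toList
  let pref := (lines.foldl stepB none).getD []
  String.mk (PySem.Chars.join ['\n'] (lines.map (fun line =>
    if PySem.Chars.startswith line pref then line.drop pref.length else line)))

-- ===== PRECONDITION & SPEC =====
def Spec_remove_indent (multiline_string : String) (out : String) : Prop := out = remove_indent_alt multiline_string
instance (multiline_string : String) (out : String) : Decidable (Spec_remove_indent multiline_string out) := by unfold Spec_remove_indent; infer_instance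

-- ===== CLAIM (what is proved, stated in full; the proofs are below) =====
def Claim_equal_remove_indent : Prop := ∀ (multiline_string : String), Dom_remove_indent multiline_string → Spec_remove_indent multiline_string (remove_indent multiline_string)

-- ===== LEMMAS AND PROOFS =====

-- line[:len(line)-len(line.lstrip())] is the leading-whitespace run
theorem ws_eq (l : List Char) :
    l.take (l.length - (PySem.Chars.lstrip l).length) = l.takeWhile PySem.Chars.isspace := by
  unfold PySem.Chars.lstrip
  induction l with
  | nil => rfl
  | cons a t ih =>
    by_cases h : PySem.Chars.isspace a
    · have hle : (List.dropWhile PySem.Chars.isspace t).length ≤ t.length :=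
        (List.dropWhile_sublist _).length_le
      simp only [List.dropWhile_cons, h, if_true, List.takeWhile_cons, List.length_cons]
      have harith : t.length + 1 - (List.dropWhile PySem.Chars.isspace t).length
          = (t.length - (List.dropWhile PySem.Chars.isspace t).length) + 1 := by omega
      rw [harith, List.take_succ_cons, ih]
    · simp [List.dropWhile_cons, h, List.takeWhile_cons]

theorem lcpB_nil_right (x : List Char) : lcpB x [] = [] := by cases x <;> rfl

theorem lcpB_prefix_left : ∀ x y : List Char, lcpB x y <+: x := by
  intro x
  induction x with
  | nil => intro y; simp [lcpB]
  | cons a xs ih =>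
    intro y
    cases y with
    | nil => simp [lcpB_nil_right]
    | cons b ys =>
      by_cases h : a = b
      · subst h; simp [lcpB, List.cons_prefix_cons, ih ys]
      · simp [lcpB, h]

theorem lcpB_prefix_right : ∀ x y : List Char, lcpB x y <+: y := by
  intro x
  induction x with
  | nil => intro y; simp [lcpB]
  | cons a xs ih =>
    intro y
    cases y with
    | nil => simp [lcpB_nil_right]
    | cons b ys =>
      by_cases h : a = b
      · subst h; simp [lcpB, List.cons_prefix_cons, ih ys]
      · simp [lcpB, h]

theorem foldl_lcpB_prefix (vs : List (List Char)) : ∀ a : List Char, vs.foldl lcpB a <+: a := by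
  induction vs with
  | nil => intro a; simp
  | cons l t ih =>
    intro a
    exact (ih (lcpB a l)).trans (lcpB_prefix_left a l)

theorem foldl_lcpB_prefix_mem (vs : List (List Char)) :
    ∀ (a l : List Char), l ∈ vs → vs.foldl lcpB a <+: l := by
  induction vs with
  | nil => intro a l h; simp at h
  | cons m t ih =>
    intro a l h
    rcases List.mem_cons.mp h with h | h
    · subst h
      exact (foldl_lcpB_prefix t (lcpB a l)).trans (lcpB_prefix_right a l)
    · exact ih (lcpB a m) l h

theorem prefix_head_eq {e c : Char} {r v : List Char} (h : (e :: r) <+: (c :: v)) : e = c :=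
  (List.cons_prefix_cons.mp h).1

theorem lcpB_cons_cons (c : Char) (a t : List Char) : lcpB (c :: a) (c :: t) = c :: lcpB a t := by
  simp [lcpB]

theorem foldl_lcpB_cons (vs : List (List Char)) :
    ∀ (a : List Char) (c : Char), (∀ l ∈ vs, ∃ t, l = c :: t) →
      vs.foldl lcpB (c :: a) = c :: (vs.map (·.tail)).foldl lcpB a := by
  induction vs with
  | nil => intro a c _; simp
  | cons l vs' ih =>
    intro a c h
    obtain ⟨t, rfl⟩ := h l (List.mem_cons_self ..)
    simp only [List.foldl_cons, lcpB_cons_cons, List.map_cons, List.tail_cons]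
    exact ih (lcpB a t) c (fun l hl => h l (List.mem_cons_of_mem _ hl))

-- lcpB commutes with taking the leading-whitespace run
theorem lcpB_ws : ∀ x y : List Char,
    lcpB (x.takeWhile PySem.Chars.isspace) (y.takeWhile PySem.Chars.isspace)
      = (lcpB x y).takeWhile PySem.Chars.isspace := by
  intro x
  induction x with
  | nil => intro y; simp [lcpB]
  | cons a xs ih =>
    intro y
    cases y with
    | nil => simp [lcpB_nil_right, lcpB]
    | cons b ys =>
      by_cases hab : a = b
      · subst hab
        by_cases hs : PySem.Chars.isspace a
        · simp [List.takeWhile_cons, hs, lcpB_cons_cons, ih ys]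
        · simp [List.takeWhile_cons, hs, lcpB]
      · have hne : (a == b) = false := by simp [hab]
        by_cases hsa : PySem.Chars.isspace a <;> by_cases hsb : PySem.Chars.isspace b <;>
          simp [List.takeWhile_cons, hsa, hsb, lcpB, hne]

theorem foldl_lcpB_ws (vs : List (List Char)) :
    ∀ a : List Char,
      vs.foldl (fun p l => lcpB p (l.takeWhile PySem.Chars.isspace)) (a.takeWhile PySem.Chars.isspace)
        = (vs.foldl lcpB a).takeWhile PySem.Chars.isspace := by
  induction vs with
  | nil => intro a; simp
  | cons l t ih =>
    intro a
    simp only [List.foldl_cons, lcpB_ws, ih]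

-- the crux: A's column-major takewhile prefix is the whitespace run of the row-major lcp fold
theorem AP_eq : ∀ (v : List Char) (vs : List (List Char)),
    ((pyZipCols (v :: vs)).takeWhile colPredA).map (·.headI)
      = (vs.foldl lcpB v).takeWhile PySem.Chars.isspace := by
  intro v
  induction v with
  | nil =>
    intro vs
    have h1 : vs.foldl lcpB [] = [] :=
      List.prefix_nil.mp (foldl_lcpB_prefix vs [])
    rw [pyZipCols.eq_def]
    simp [h1]
  | cons c v' ih =>
    intro vs
    by_cases hemp : vs.any (·.isEmpty) = true
    · -- some later line is empty: both sides are []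
      obtain ⟨l, hl, hle⟩ := List.any_eq_true.mp hemp
      have hlnil : l = [] := List.isEmpty_iff.mp hle
      have h1 : vs.foldl lcpB (c :: v') = [] := by
        have := foldl_lcpB_prefix_mem vs (c :: v') l hl
        rw [hlnil] at this
        exact List.prefix_nil.mp this
      rw [pyZipCols.eq_def]
      simp [hemp, h1]
    · -- every line nonempty; look at the first column
      have hall : ∀ l ∈ vs, l ≠ [] := by
        intro l hl hln
        exact hemp (List.any_eq_true.mpr ⟨l, hl, by simp [hln]⟩)
      have hcond : ¬((c :: v') :: vs = [] ∨ ((c :: v') :: vs).any (·.isEmpty) = true) := by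
        simp only [List.any_cons]
        simp [hemp]
      rw [pyZipCols, if_neg hcond]
      have hcol : ((c :: v') :: vs).map (·.headI) = c :: vs.map (·.headI) := by simp
      by_cases hsp : PySem.Chars.isspace c
      · by_cases hhd : (vs.map (·.headI)).all (fun d => c == d) = true
        · -- whole column is the whitespace char c
          have hcons : ∀ l ∈ vs, ∃ t, l = c :: t := by
            intro l hl
            have hne := hall l hl
            cases l with
            | nil => exact absurd rfl hne
            | cons d t =>
              have hcd : (c == d) = true := by
                have := List.all_eq_true.mp hhd (d :: t).headI (List.mem_map_of_mem hl)
                simpa using this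
              exact ⟨t, by rw [beq_iff_eq.mp hcd]⟩
          have hpred : colPredA (((c :: v') :: vs).map (·.headI)) = true := by
            rw [hcol]
            simp only [colPredA, List.all_cons, List.headI_cons]
            simp [hsp, hhd]
          have htails : ((c :: v') :: vs).map (·.tail) = v' :: vs.map (·.tail) := by simp
          rw [List.takeWhile_cons_of_pos hpred, List.map_cons, htails, ih (vs.map (·.tail)),
            foldl_lcpB_cons vs v' c hcons, List.takeWhile_cons_of_pos (by simpa using hsp)]
          simp [hcol]
        · -- heads disagree: the fold collapses to []
          obtain ⟨d, hd, hdc⟩ := List.all_eq_false.mp (Bool.eq_false_iff.mpr hhd)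
          obtain ⟨l, hl, rfl⟩ := List.mem_map.mp hd
          have hlc : l.headI ≠ c := fun h => by simp [h] at hdc
          have h1 : vs.foldl lcpB (c :: v') = [] := by
            have hpl := foldl_lcpB_prefix vs (c :: v')
            have hpm := foldl_lcpB_prefix_mem vs (c :: v') l hl
            cases hfl : vs.foldl lcpB (c :: v') with
            | nil => rfl
            | cons e r =>
              rw [hfl] at hpl hpm
              have he : e = c := prefix_head_eq hpl
              cases hll : l with
              | nil => exact absurd hll (hall l hl)
              | cons f t =>
                rw [hll] at hpm
                have hf : e = f := prefix_head_eq hpm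
                rw [hll] at hlc
                exact absurd (by simp [← hf, he]) hlc
          have hpred : colPredA (c :: vs.map (·.headI)) = false := by
            unfold colPredA
            apply List.all_eq_false.mpr
            exact ⟨l.headI, List.mem_cons_of_mem _ hd, by simp [hdc]⟩
          rw [List.takeWhile_cons_of_neg (by simp [hpred]), h1]
          simp
      · -- first char of the first line is not whitespace: both sides []
        have hpred : colPredA (c :: vs.map (·.headI)) = false := by
          unfold colPredA
          apply List.all_eq_false.mpr
          exact ⟨c, List.mem_cons_self .., by simp [hsp]⟩
        rw [List.takeWhile_cons_of_neg (by simp [hpred])]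
        have : (vs.foldl lcpB (c :: v')).takeWhile PySem.Chars.isspace = [] := by
          have hpl := foldl_lcpB_prefix vs (c :: v')
          cases hfl : vs.foldl lcpB (c :: v') with
          | nil => rfl
          | cons e r =>
            rw [hfl] at hpl
            have he : e = c := prefix_head_eq hpl
            rw [List.takeWhile_cons_of_neg (by simpa [he] using hsp)]
        rw [this]
        simp

-- B's guarded Option fold over all lines, restricted to the valid ones
theorem foldl_stepB_some (vs : List (List Char)) :
    ∀ p : List Char,
      vs.foldl (fun o l => some (match o with
          | none => l.take (l.length - (PySem.Chars.lstrip l).length)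
          | some q => lcpB q (l.take (l.length - (PySem.Chars.lstrip l).length)))) (some p)
        = some (vs.foldl (fun q l => lcpB q (l.take (l.length - (PySem.Chars.lstrip l).length))) p) := by
  induction vs with
  | nil => intro p; rfl
  | cons l t ih => intro p; simpa using ih _

-- the two computed common prefixes coincide
theorem prefix_eq (lines : List (List Char)) :
    ((pyZipCols (lines.filter (fun line => !(PySem.Chars.strip line).isEmpty))).takeWhile colPredA).map (·.headI)
      = (lines.foldl stepB none).getD [] := by
  have hstep : lines.foldl stepB none
      = (lines.filter (fun line => !(PySem.Chars.strip line).isEmpty)).foldl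
          (fun o l => some (match o with
            | none => l.take (l.length - (PySem.Chars.lstrip l).length)
            | some q => lcpB q (l.take (l.length - (PySem.Chars.lstrip l).length)))) none := by
    rw [List.foldl_filter]
    rfl
  rw [hstep]
  cases hv : lines.filter (fun line => !(PySem.Chars.strip line).isEmpty) with
  | nil =>
    rw [pyZipCols.eq_def]
    simp
  | cons v vs =>
    simp only [List.foldl_cons]
    rw [foldl_stepB_some, Option.getD_some, AP_eq v vs]
    have harg : ∀ l : List Char,
        l.take (l.length - (PySem.Chars.lstrip l).length) = l.takeWhile PySem.Chars.isspace :=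
      ws_eq
    simp only [harg]
    exact (foldl_lcpB_ws vs v).symm

-- ===== VERDICT (by name: the statement is the Claim_ definition above) =====
theorem remove_indent_spec : Claim_equal_remove_indent := by
  intro s _
  unfold Spec_remove_indent
  simp only [remove_indent, remove_indent_alt]
  rw [prefix_eq (PySem.Chars.splitlines s.toList)]
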